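-- pv_equiv track=rewrite | github.com/rtafds/MarkdownDeepL | src/markdown_deepl_strait.py | tex_perserve_preprocess
-- ===== SOURCE A (Python) =====
-- def tex_perserve_preprocess(load_str):
--     # $aa$びように挟まれた場所を翻訳されないように、<keep>aaa</keep>で挟む。
--     # いいやり方を思いつかなかったので、交互に変換する。ちゃんと交互になっていると信じる。
--     for i in range(10000):
--         load_str = load_str.replace(r"$",r"<keep>",1)
--         load_str = load_str.replace(r"$",r"</keep>",1)
--     # $$aa$$の場合は、<keep></keep>になってしまっているので、そこは<keep2>aaa</keep2>に変える。
--     for i in range(1000):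
--         load_str = load_str.replace(r"<keep></keep>",r"<keep2>",1)
--         load_str = load_str.replace(r"<keep></keep>",r"</keep2>",1)
--     return load_str
-- ===== SOURCE B (Python) =====
-- def tex_perserve_preprocess(load_str):
--     # pass 1: one left-to-right scan, tagging the first 20000 '$' alternately
--     pieces = []
--     j = 0
--     for ch in load_str:
--         if ch == '$' and j < 20000:
--             pieces.append('<keep>' if j % 2 == 0 else '</keep>')
--             j += 1
--         else:
--             pieces.append(ch)
--     s = ''.join(pieces)
--     # pass 2: one forward scan replacing up to 2000 '<keep></keep>' occurrences alternately
--     pat = '<keep></keep>'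
--     out = []
--     rest = s
--     for j in range(2000):
--         k = rest.find(pat)
--         if k < 0:
--             break
--         out.append(rest[:k])
--         out.append('<keep2>' if j % 2 == 0 else '</keep2>')
--         rest = rest[k + len(pat):]
--     out.append(rest)
--     return ''.join(out)
-- ===== Notes on version B (the rewrite author's own statement) =====
-- stated objective: faster
-- what changed: Replaces A's 11000 whole-string replace(...,1) passes by two single left-to-right scans: one char scan tagging the first 20000 '$' alternately, then one forward find-scan replacing up to 2000 '<keep></keep>' occurrences alternately, never rescanning from the start.
import Mathlib
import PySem

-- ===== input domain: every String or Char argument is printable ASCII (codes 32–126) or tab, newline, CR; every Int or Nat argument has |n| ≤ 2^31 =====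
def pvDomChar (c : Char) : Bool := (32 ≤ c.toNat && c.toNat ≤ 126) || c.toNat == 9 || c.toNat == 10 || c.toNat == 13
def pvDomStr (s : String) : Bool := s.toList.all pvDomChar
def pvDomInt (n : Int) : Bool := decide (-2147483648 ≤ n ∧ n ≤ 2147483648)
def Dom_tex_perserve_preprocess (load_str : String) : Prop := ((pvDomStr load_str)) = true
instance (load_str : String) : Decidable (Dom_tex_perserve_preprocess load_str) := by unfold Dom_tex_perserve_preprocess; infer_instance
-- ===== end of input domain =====

-- B replaces A's 11000 whole-string replace(...,1) passes by two single left-to-right scans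
-- over the text; same return value, proved equal below.


-- literal strings used by both programs, as character lists
def pvDollar : List Char := ['$']
def pvKeepOpen : List Char := ['<','k','e','e','p','>']
def pvKeepClose : List Char := ['<','/','k','e','e','p','>']
def pvPat2 : List Char := ['<','k','e','e','p','>','<','/','k','e','e','p','>']
def pvKeep2Open : List Char := ['<','k','e','e','p','2','>']
def pvKeep2Close : List Char := ['<','/','k','e','e','p','2','>']

-- ===== PORT A =====
-- hand port of Python's s.replace(old, new, 1) (PySem.Str.replace has no count
-- argument): replace the FIRST occurrence, located with PySem.Chars.find; exact.
def pvReplaceOnce (s old new : List Char) : List Char :=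
  let k := PySem.Chars.find s old
  if k < 0 then s else s.take k.toNat ++ new ++ s.drop (k.toNat + old.length)

def tex_perserve_preprocess (load_str : String) : String :=
  -- for i in range(10000): replace "$"→"<keep>" once, then "$"→"</keep>" once
  let t1 := (List.range 10000).foldl
    (fun s _ => pvReplaceOnce (pvReplaceOnce s pvDollar pvKeepOpen) pvDollar pvKeepClose)
    load_str.toList
  -- for i in range(1000): replace "<keep></keep>"→"<keep2>" once, then →"</keep2>" once
  let t2 := (List.range 1000).foldl
    (fun s _ => pvReplaceOnce (pvReplaceOnce s pvPat2 pvKeep2Open) pvPat2 pvKeep2Close)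
    t1
  String.ofList t2

-- ===== PORT B =====
def pvTag1 (j : Nat) : List Char := if j % 2 = 0 then pvKeepOpen else pvKeepClose
def pvTag2 (j : Nat) : List Char := if j % 2 = 0 then pvKeep2Open else pvKeep2Close

-- pass 1 of Source B: one character scan, tagging the first 20000 '$' alternately
def pvScan1 : Nat → List Char → List Char
  | _, [] => []
  | j, c :: t =>
    if c = '$' ∧ j < 20000 then pvTag1 j ++ pvScan1 (j+1) t
    else c :: pvScan1 j t

-- pass 2 loop of Source B: 'for j in range(n): k = rest.find(p); if k < 0: break; …'
-- (budget n = loop iterations left, j = replacement index choosing the tag r j)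
def pvFindScan (p : List Char) (r : Nat → List Char) : Nat → Nat → List Char → List Char
  | 0, _, rest => rest
  | n+1, j, rest =>
    let k := PySem.Chars.find rest p
    if k < 0 then rest
    else rest.take k.toNat ++ r j ++ pvFindScan p r n (j+1) (rest.drop (k.toNat + p.length))

def tex_perserve_preprocess_alt (load_str : String) : String :=
  String.ofList (pvFindScan pvPat2 pvTag2 2000 0 (pvScan1 0 load_str.toList))

-- ===== PRECONDITION & SPEC =====
def Spec_tex_perserve_preprocess (load_str : String) (out : String) : Prop := out = tex_perserve_preprocess_alt load_str
instance (load_str : String) (out : String) : Decidable (Spec_tex_perserve_preprocess load_str out) := by unfold Spec_tex_perserve_preprocess; infer_instance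

-- ===== CLAIM (what is proved, stated in full; the proofs are below) =====
def Claim_equal_tex_perserve_preprocess : Prop := ∀ (load_str : String), Dom_tex_perserve_preprocess load_str → Spec_tex_perserve_preprocess load_str (tex_perserve_preprocess load_str)

-- ===== LEMMAS AND PROOFS =====

-- A's loops, reshaped with an explicit call index: n more replaceOnce calls, the j-th using tag r j
def pvIterRep (p : List Char) (r : Nat → List Char) : Nat → Nat → List Char → List Char
  | 0, _, s => s
  | n+1, j, s => pvIterRep p r n (j+1) (pvReplaceOnce s p (r j))

lemma pv_infix_of_prefix_drop {p s : List Char} {i : Nat} (h : p <+: s.drop i) : p <:+: s :=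
  h.isInfix.trans (List.drop_suffix i s).isInfix

lemma pv_prefix_of_prefix_append {p a b : List Char} (h : p <+: a ++ b) (hl : p.length ≤ a.length) :
    p <+: a := by
  have h1 : p = (a ++ b).take p.length := List.prefix_iff_eq_take.mp h
  have h2 : (a ++ b).take p.length = a.take p.length := by
    rw [List.take_append, Nat.sub_eq_zero_of_le hl]; simp
  rw [List.prefix_iff_eq_take]
  exact h1.trans h2

lemma pv_drop_left' {a b : List Char} {n : Nat} (h : a.length = n) : (a ++ b).drop n = b := by
  rw [List.drop_append, ← h]; simp

-- find points at the first occurrence; conversely an explicit first occurrence pins its value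
lemma pv_find_eq_of_first {p s : List Char} {k : Nat}
    (h1 : p <+: s.drop k) (h2 : ∀ i < k, ¬ p <+: s.drop i) :
    PySem.Chars.find s p = (k : Int) := by
  have hinf : p <:+: s := pv_infix_of_prefix_drop h1
  have hne : PySem.Chars.find s p ≠ -1 := fun h => (PySem.Chars.find_eq_neg_one_iff s p).mp h hinf
  have hle : -1 ≤ PySem.Chars.find s p := PySem.Chars.neg_one_le_find s p
  have h0 : 0 ≤ PySem.Chars.find s p := by omega
  obtain ⟨hpre, hmin⟩ := PySem.Chars.find_spec h0
  rcases lt_trichotomy (PySem.Chars.find s p).toNat k with h | h | h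
  · exact absurd hpre (h2 _ h)
  · omega
  · exact absurd h1 (hmin k h)

lemma pv_find_nonneg_decomp {p s : List Char} (h : 0 ≤ PySem.Chars.find s p) :
    s = s.take (PySem.Chars.find s p).toNat ++ p ++ s.drop ((PySem.Chars.find s p).toNat + p.length) := by
  obtain ⟨hpre, -⟩ := PySem.Chars.find_spec h
  set k := (PySem.Chars.find s p).toNat with hk
  obtain ⟨u, hu⟩ := hpre
  have hdrop : s.drop (k + p.length) = u := by
    have hstep : s.drop (k + p.length) = (s.drop k).drop p.length := by
      rw [List.drop_drop]
    rw [hstep, ← hu, List.drop_left]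
  conv_lhs => rw [← List.take_append_drop k s, ← hu, ← hdrop]
  simp [List.append_assoc]

-- find on out ++ rest when no occurrence starts inside out
lemma pv_find_shift {p : List Char} (out rest : List Char)
    (hout : ∀ i < out.length, ¬ p <+: (out ++ rest).drop i) :
    PySem.Chars.find (out ++ rest) p =
      if PySem.Chars.find rest p < 0 then -1 else (out.length : Int) + PySem.Chars.find rest p := by
  have hdropge : ∀ i, out.length ≤ i → (out ++ rest).drop i = rest.drop (i - out.length) := by
    intro i hi
    rw [List.drop_append]
    have : out.drop i = [] := List.drop_eq_nil_of_le hi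
    simp [this]
  by_cases hr : PySem.Chars.find rest p < 0
  · have hm1 : PySem.Chars.find rest p = -1 := by
      have := PySem.Chars.neg_one_le_find rest p; omega
    have hni : ¬ p <:+: rest := (PySem.Chars.find_eq_neg_one_iff rest p).mp hm1
    rw [if_pos hr]
    rw [PySem.Chars.find_eq_neg_one_iff]
    intro hinf
    have hIn : PySem.Chars.isIn p (out ++ rest) = true := (PySem.Chars.isIn_iff_infix p _).mpr hinf
    obtain ⟨i, hi⟩ := (PySem.Chars.exists_prefix_drop_iff_isIn p _).mpr hIn
    rcases lt_or_ge i out.length with hlt | hge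
    · exact hout i hlt hi
    · rw [hdropge i hge] at hi
      exact hni (pv_infix_of_prefix_drop hi)
  · have h0 : 0 ≤ PySem.Chars.find rest p := by
      have := PySem.Chars.neg_one_le_find rest p; omega
    obtain ⟨hpre, hmin⟩ := PySem.Chars.find_spec h0
    set k := (PySem.Chars.find rest p).toNat with hk
    rw [if_neg hr]
    have : PySem.Chars.find (out ++ rest) p = ((out.length + k : Nat) : Int) := by
      apply pv_find_eq_of_first
      · rw [hdropge _ (by omega)]
        simpa using hpre
      · intro i hi
        rcases lt_or_ge i out.length with hlt | hge
        · exact hout i hlt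
        · rw [hdropge i hge]
          exact hmin _ (by omega)
    rw [this]
    push_cast
    omega

-- after replacing the first occurrence of p (sitting at the end of pre) by rep,
-- still no occurrence of p starts inside the processed prefix pre ++ rep
lemma pv_nostart_step {p rep rest' pre : List Char}
    (hp : p ≠ [])
    (hInf : ¬ rep <:+: p) (hPInf : ¬ p <:+: rep)
    (h3 : ∀ m < p.length + 1, 0 < m → m ≤ rep.length → p.drop (p.length - m) ≠ rep.take m)
    (h4 : ∀ m < rep.length, 0 < m → m ≤ p.length → rep.drop (rep.length - m) ≠ p.take m)
    (hpre : ∀ i < pre.length, ¬ p <+: (pre ++ p ++ rest').drop i) :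
    ∀ i < pre.length + rep.length, ¬ p <+: (pre ++ rep ++ rest').drop i := by
  intro i hi hmat
  have hP : 0 < p.length := List.length_pos_iff.mpr hp
  set L := pre.length with hL
  set R := rep.length with hR
  rcases lt_or_ge i L with hiL | hiL
  · -- occurrence starts inside pre
    have hdp : (pre ++ rep ++ rest').drop i = pre.drop i ++ (rep ++ rest') := by
      rw [List.append_assoc, List.drop_append, Nat.sub_eq_zero_of_le (le_of_lt hiL)]; simp
    rw [hdp] at hmat
    have hlen : (pre.drop i).length = L - i := by rw [List.length_drop]
    rcases le_or_gt (i + p.length) L with hend | hend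
    · -- window entirely inside pre : contradicts hpre
      have hpa : p <+: pre.drop i := by
        apply pv_prefix_of_prefix_append hmat
        rw [List.length_drop]; omega
      apply hpre i hiL
      have hdp2 : (pre ++ p ++ rest').drop i = pre.drop i ++ (p ++ rest') := by
        rw [List.append_assoc, List.drop_append, Nat.sub_eq_zero_of_le (le_of_lt hiL)]; simp
      rw [hdp2]
      exact hpa.trans (List.prefix_append _ _)
    · -- window straddles the pre | rep boundary
      set m := i + p.length - L with hm
      have hm0 : 0 < m := by omega
      have hmP : m ≤ p.length := by omega
      have hpe : p = (pre.drop i ++ (rep ++ rest')).take p.length :=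
        List.prefix_iff_eq_take.mp hmat
      have hkey : p.drop (p.length - m) = (rep ++ rest').take m := by
        have e1 : p.length - m = L - i := by omega
        have step1 : p.drop (L - i)
            = ((pre.drop i ++ (rep ++ rest')).take p.length).drop (L - i) := by rw [← hpe]
        rw [List.drop_take, pv_drop_left' hlen] at step1
        have e2 : p.length - (L - i) = m := by omega
        rw [e1, step1, e2]
      rcases le_or_gt m R with hmR | hmR
      · -- a nonempty suffix of p would be a prefix of rep
        have : (rep ++ rest').take m = rep.take m := by
          rw [List.take_append, Nat.sub_eq_zero_of_le hmR]; simp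
        exact h3 m (by omega) hm0 hmR (by rw [hkey, this])
      · -- rep would be an infix of p
        have : (rep ++ rest').take m = rep ++ rest'.take (m - R) := by
          rw [List.take_append, List.take_of_length_le (by omega)]
        have hsplit : p = p.take (p.length - m) ++ (rep ++ rest'.take (m - R)) := by
          conv_lhs => rw [← List.take_append_drop (p.length - m) p]
          rw [hkey, this]
        exact hInf ⟨p.take (p.length - m), rest'.take (m - R), by
          rw [List.append_assoc]; exact hsplit.symm⟩
  · -- occurrence starts inside rep
    set d := i - L with hd
    have hdR : d < R := by omega
    have hdp : (pre ++ rep ++ rest').drop i = rep.drop d ++ rest' := by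
      rw [List.append_assoc, List.drop_append, List.drop_eq_nil_of_le hiL, List.nil_append,
        List.drop_append, Nat.sub_eq_zero_of_le (le_of_lt hdR)]
      simp
      omega
    rw [hdp] at hmat
    have hlen : (rep.drop d).length = R - d := by rw [List.length_drop]
    set m' := R - d with hm'
    have hm'0 : 0 < m' := by omega
    rcases le_or_gt p.length m' with hPm | hPm
    · -- p would lie inside rep
      exact hPInf (pv_infix_of_prefix_drop (p := p) (s := rep) (i := d)
        (pv_prefix_of_prefix_append hmat (by omega)))
    · -- a nonempty suffix of rep would be a prefix of p
      have hpt : p.take m' = rep.drop d := by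
        have hpe : p = (rep.drop d ++ rest').take p.length := List.prefix_iff_eq_take.mp hmat
        have : p.take m' = ((rep.drop d ++ rest').take p.length).take m' := by rw [← hpe]
        rw [List.take_take, Nat.min_eq_left (le_of_lt hPm), List.take_append,
          Nat.sub_eq_zero_of_le (le_of_eq hlen.symm), List.take_of_length_le (le_of_eq hlen)] at this
        simpa using this
      rcases Nat.eq_zero_or_pos d with hd0 | hd0
      · -- i = L : rep would be a prefix of p
        apply hInf
        have : rep <+: p := by
          have hm'R : m' = rep.length := by omega
          rw [List.prefix_iff_eq_take, ← hm'R]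
          rw [hd0, List.drop_zero] at hpt
          exact hpt.symm
        exact this.isInfix
      · exact h4 m' (by omega) hm'0 (le_of_lt hPm) (by rw [show R - m' = d by omega, hpt])

lemma pv_findScan_noocc {p : List Char} (r : Nat → List Char) {rest : List Char}
    (h : PySem.Chars.find rest p < 0) (n j : Nat) : pvFindScan p r n j rest = rest := by
  cases n <;> simp [pvFindScan, h]

-- MAIN: A's repeated replace-first equals B's single forward find-scan
lemma pv_main (p : List Char) (r : Nat → List Char) (hp : p ≠ [])
    (hInf : ∀ j, ¬ r j <:+: p) (hPInf : ∀ j, ¬ p <:+: r j)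
    (h3 : ∀ j, ∀ m < p.length + 1, 0 < m → m ≤ (r j).length → p.drop (p.length - m) ≠ (r j).take m)
    (h4 : ∀ j, ∀ m < (r j).length, 0 < m → m ≤ p.length → (r j).drop ((r j).length - m) ≠ p.take m) :
    ∀ n j out rest, (∀ i < out.length, ¬ p <+: (out ++ rest).drop i) →
      pvIterRep p r n j (out ++ rest) = out ++ pvFindScan p r n j rest := by
  have hP : 0 < p.length := List.length_pos_iff.mpr hp
  intro n
  induction n with
  | zero => intro j out rest h; rfl
  | succ n ih =>
    intro j out rest hout
    have hshift := pv_find_shift (p := p) out rest hout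
    by_cases hk : PySem.Chars.find rest p < 0
    · have hfind : PySem.Chars.find (out ++ rest) p = -1 := by rw [hshift, if_pos hk]
      show pvIterRep p r n (j+1) (pvReplaceOnce (out ++ rest) p (r j)) = out ++ pvFindScan p r (n+1) j rest
      rw [show pvReplaceOnce (out ++ rest) p (r j) = out ++ rest from by
        simp [pvReplaceOnce, hfind]]
      rw [ih (j+1) out rest hout, pv_findScan_noocc r hk n (j+1), pv_findScan_noocc r hk (n+1) j]
    · have h0 : 0 ≤ PySem.Chars.find rest p := by
        have := PySem.Chars.neg_one_le_find rest p; omega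
      set k := (PySem.Chars.find rest p).toNat with hkdef
      obtain ⟨hpre_at, hmin⟩ := PySem.Chars.find_spec h0
      have hklen : k + p.length ≤ rest.length := by
        have h1 : p.length ≤ (rest.drop k).length := hpre_at.length_le
        rw [List.length_drop] at h1
        omega
      have hfind : PySem.Chars.find (out ++ rest) p = ((out.length + k : Nat) : Int) := by
        rw [hshift, if_neg hk]; push_cast; omega
      have hdecomp := pv_find_nonneg_decomp h0
      rw [← hkdef] at hdecomp
      have hro : pvReplaceOnce (out ++ rest) p (r j)
          = ((out ++ rest.take k) ++ r j) ++ rest.drop (k + p.length) := by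
        simp only [pvReplaceOnce, hfind]
        rw [if_neg (by omega), Int.toNat_natCast, List.take_append, List.drop_append,
          List.take_of_length_le (by omega), List.drop_eq_nil_of_le (by omega),
          Nat.add_sub_cancel_left, List.nil_append]
        have : out.length + k + p.length - out.length = k + p.length := by omega
        rw [this, List.append_assoc]
      have heq : (out ++ rest.take k) ++ p ++ rest.drop (k + p.length) = out ++ rest := by
        conv_rhs => rw [hdecomp]
        simp [List.append_assoc]
      have hinv : ∀ i < (out ++ rest.take k).length,
          ¬ p <+: ((out ++ rest.take k) ++ p ++ rest.drop (k + p.length)).drop i := by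
        rw [heq]
        intro i hi
        rw [List.length_append, List.length_take] at hi
        rcases lt_or_ge i out.length with h1 | h1
        · exact hout i h1
        · have hdl : (out ++ rest).drop i = rest.drop (i - out.length) := by
            rw [List.drop_append, List.drop_eq_nil_of_le h1, List.nil_append]
          rw [hdl]
          exact hmin _ (by omega)
      have hinv2 := pv_nostart_step hp (hInf j) (hPInf j) (h3 j) (h4 j) hinv
      show pvIterRep p r n (j+1) (pvReplaceOnce (out ++ rest) p (r j)) = out ++ pvFindScan p r (n+1) j rest
      rw [hro]
      rw [ih (j+1) ((out ++ rest.take k) ++ r j) (rest.drop (k + p.length)) (by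
        intro i hi
        have := hinv2 i (by rw [List.length_append] at hi; exact hi)
        simpa [List.append_assoc] using this)]
      have hscan : pvFindScan p r (n+1) j rest
          = rest.take k ++ r j ++ pvFindScan p r n (j+1) (rest.drop (k + p.length)) := by
        simp only [pvFindScan]
        rw [if_neg hk]
      rw [hscan]
      simp [List.append_assoc]

-- ---- bridges for A's foldl shape ----
lemma pv_foldl_range (g : List Char → List Char) (m : Nat) (s : List Char) :
    (List.range m).foldl (fun a _ => g a) s = g^[m] s := by
  induction m generalizing s with
  | zero => rfl
  | succ m ih => rw [List.range_succ, List.foldl_append, ih, Function.iterate_succ_apply']; rfl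

lemma pv_iterate_pair (p r0 r1 : List Char) :
    ∀ m j s, j % 2 = 0 →
      (fun s => pvReplaceOnce (pvReplaceOnce s p r0) p r1)^[m] s
        = pvIterRep p (fun j => if j % 2 = 0 then r0 else r1) (2*m) j s := by
  intro m
  induction m with
  | zero => intro j s _; rfl
  | succ m ih =>
    intro j s hj
    rw [Function.iterate_succ_apply]
    rw [show 2*(m+1) = (2*m)+1+1 by ring]
    have hstep : pvIterRep p (fun j => if j % 2 = 0 then r0 else r1) ((2*m)+1+1) j s
        = pvIterRep p (fun j => if j % 2 = 0 then r0 else r1) (2*m) (j+2)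
            (pvReplaceOnce (pvReplaceOnce s p r0) p r1) := by
      show pvIterRep p (fun j => if j % 2 = 0 then r0 else r1) (2*m) (j+2)
          (pvReplaceOnce (pvReplaceOnce s p (if j % 2 = 0 then r0 else r1)) p
            (if (j+1) % 2 = 0 then r0 else r1)) = _
      rw [if_pos hj, if_neg (by omega)]
    rw [hstep]
    exact ih (j+2) _ (by omega)

-- ---- pass 1: the find-scan over "$" is exactly the character scan pvScan1 ----
lemma pv_singleton_not_prefix {c d : Char} (h : c ≠ d) (t : List Char) : ¬ [c] <+: d :: t := by
  rintro ⟨u, hu⟩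
  simp only [List.cons_append, List.nil_append, List.cons.injEq] at hu
  exact h hu.1

lemma pv_findScan_cons {r : Nat → List Char} {c : Char} (hc : ¬ c = '$') (n j : Nat) (t : List Char) :
    pvFindScan pvDollar r n j (c :: t) = c :: pvFindScan pvDollar r n j t := by
  have hshift : PySem.Chars.find (c :: t) pvDollar =
      if PySem.Chars.find t pvDollar < 0 then -1 else 1 + PySem.Chars.find t pvDollar := by
    have := pv_find_shift (p := pvDollar) [c] t (by
      intro i hi
      have hi0 : i = 0 := by simpa using hi
      subst hi0
      simp only [List.singleton_append, List.drop_zero]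
      exact pv_singleton_not_prefix (fun h => hc h.symm) t)
    simpa using this
  cases n with
  | zero => rfl
  | succ n =>
    by_cases h : PySem.Chars.find t pvDollar < 0
    · rw [if_pos h] at hshift
      simp [pvFindScan, hshift, h]
    · rw [if_neg h] at hshift
      have h0 : 0 ≤ PySem.Chars.find t pvDollar := by
        have := PySem.Chars.neg_one_le_find t pvDollar; omega
      simp only [pvFindScan, hshift]
      rw [if_neg (by omega), if_neg h]
      have ht : (1 + PySem.Chars.find t pvDollar).toNat = (PySem.Chars.find t pvDollar).toNat + 1 := by omega
      rw [ht]
      simp [List.take_succ_cons, List.drop_succ_cons, pvDollar]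

lemma pvScan1_ge : ∀ (s : List Char) (j : Nat), 20000 ≤ j → pvScan1 j s = s := by
  intro s
  induction s with
  | nil => intro j h; rfl
  | cons c t ih => intro j h; simp [pvScan1, ih j h]; omega

lemma pv_pass1_eq : ∀ (s : List Char) (n j : Nat), n + j = 20000 →
    pvFindScan pvDollar pvTag1 n j s = pvScan1 j s := by
  intro s
  induction s with
  | nil =>
    intro n j h
    have hf : PySem.Chars.find [] pvDollar = -1 := by decide
    cases n with
    | zero => rfl
    | succ n => simp [pvFindScan, pvScan1, hf]
  | cons c t ih =>
    intro n j h
    by_cases hc : c = '$'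
    · subst hc
      cases n with
      | zero =>
        rw [pvFindScan]
        rw [pvScan1, if_neg (by omega), pvScan1_ge t j (by omega)]
      | succ n =>
        have hfind : PySem.Chars.find ('$' :: t) pvDollar = (0 : Int) := by
          have := pv_find_eq_of_first (k := 0) (s := '$' :: t) (p := pvDollar)
            ⟨t, rfl⟩ (by intro i hi; omega)
          exact_mod_cast this
        rw [pvFindScan]
        simp only [hfind]
        rw [if_neg (by omega)]
        rw [pvScan1, if_pos ⟨rfl, by omega⟩]
        simp only [Int.toNat_zero, List.take_zero, List.nil_append]
        have : List.drop (0 + pvDollar.length) ('$' :: t) = t := by simp [pvDollar]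
        rw [this, ih n (j+1) (by omega)]
    · rw [pv_findScan_cons hc, pvScan1, if_neg (by simp [hc]), ih n j h]

-- ---- the two passes of A, each rewritten to B's scans ----
lemma pv_pass1_total (s : List Char) :
    (List.range 10000).foldl
      (fun t _ => pvReplaceOnce (pvReplaceOnce t pvDollar pvKeepOpen) pvDollar pvKeepClose) s
      = pvScan1 0 s := by
  rw [pv_foldl_range, pv_iterate_pair pvDollar pvKeepOpen pvKeepClose 10000 0 s rfl]
  have hmain := pv_main pvDollar pvTag1 (by decide)
    (by intro j; unfold pvTag1; split <;> decide)
    (by intro j; unfold pvTag1; split <;> decide)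
    (by intro j; unfold pvTag1; split <;> decide)
    (by intro j; unfold pvTag1; split <;> decide)
    20000 0 [] s (by intro i hi; simp at hi)
  rw [List.nil_append] at hmain
  show pvIterRep pvDollar pvTag1 20000 0 s = pvScan1 0 s
  rw [hmain, List.nil_append, pv_pass1_eq s 20000 0 rfl]

lemma pv_pass2_total (t : List Char) :
    (List.range 1000).foldl
      (fun u _ => pvReplaceOnce (pvReplaceOnce u pvPat2 pvKeep2Open) pvPat2 pvKeep2Close) t
      = pvFindScan pvPat2 pvTag2 2000 0 t := by
  rw [pv_foldl_range, pv_iterate_pair pvPat2 pvKeep2Open pvKeep2Close 1000 0 t rfl]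
  have hmain := pv_main pvPat2 pvTag2 (by decide)
    (by intro j; unfold pvTag2; split <;> decide)
    (by intro j; unfold pvTag2; split <;> decide)
    (by intro j; unfold pvTag2; split <;> decide)
    (by intro j; unfold pvTag2; split <;> decide)
    2000 0 [] t (by intro i hi; simp at hi)
  rw [List.nil_append] at hmain
  show pvIterRep pvPat2 pvTag2 2000 0 t = pvFindScan pvPat2 pvTag2 2000 0 t
  rw [hmain, List.nil_append]

-- ===== VERDICT (by name: the statement is the Claim_ definition above) =====
theorem tex_perserve_preprocess_spec : Claim_equal_tex_perserve_preprocess := by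
  intro s _
  show String.ofList ((List.range 1000).foldl
      (fun u _ => pvReplaceOnce (pvReplaceOnce u pvPat2 pvKeep2Open) pvPat2 pvKeep2Close)
      ((List.range 10000).foldl
        (fun u _ => pvReplaceOnce (pvReplaceOnce u pvDollar pvKeepOpen) pvDollar pvKeepClose)
        s.toList))
    = String.ofList (pvFindScan pvPat2 pvTag2 2000 0 (pvScan1 0 s.toList))
  rw [pv_pass1_total, pv_pass2_total]
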